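-- pv_equiv track=rewrite | github.com/yunyezl/ps | problem/PRG/불량사용자.py | solution
-- ===== SOURCE A (Python) =====
-- def solution(user_id, banned_id):
--     answer = 1
--     all = []
--     for i, ban in enumerate(banned_id):
--         temp = []
--         for user in user_id:
--             if len(user) == len(ban):
--                 for j in range(len(ban)):
--                     if user[j] == ban[j] or ban[j] == "*":
--                         continue
--                     else:
--                         break
--                 else:
--                     temp.append(user)
--         all.append(temp)
--
--     cases = []
--
--     def dfs(i, select):
--         if len(select) == len(banned_id):
--             if sorted(select) not in cases:
--                 cases.append(sorted(select))
--             return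
--
--         arr = all[i]
--         for a in arr:
--             if a in select:
--                 continue
--             select.append(a)
--             dfs(i + 1, select)
--             select.pop()
--
--     dfs(0, [])
--     return len(cases)
-- ===== SOURCE B (Python) =====
-- def solution(user_id, banned_id):
--     def matches(user, ban):
--         return len(user) == len(ban) and all(b == "*" or u == b for u, b in zip(user, ban))
--
--     # duplicate users give identical frozensets, so each candidate list is deduplicated up front
--     candidates = [list(dict.fromkeys(u for u in user_id if matches(u, ban))) for ban in banned_id]
--
--     combos = [()]
--     for cand in candidates:
--         combos = [c + (u,) for c in combos for u in cand]
--
--     result = set()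
--     for combo in combos:
--         if len(set(combo)) == len(combo):
--             result.add(frozenset(combo))
--     return len(result)
-- ===== Notes on version B (the rewrite author's own statement) =====
-- stated objective: alternative
-- what changed: Replaces the incremental DFS backtracking (in-place select list, per-step duplicate pruning, linear 'sorted(select) not in cases' dedup) by a flat cartesian-product enumeration over per-pattern candidate lists deduplicated up front, with a len(set(combo))==len(combo) distinctness filter and set-of-frozensets dedup; the wildcard matching becomes zip+all.
import Mathlib
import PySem

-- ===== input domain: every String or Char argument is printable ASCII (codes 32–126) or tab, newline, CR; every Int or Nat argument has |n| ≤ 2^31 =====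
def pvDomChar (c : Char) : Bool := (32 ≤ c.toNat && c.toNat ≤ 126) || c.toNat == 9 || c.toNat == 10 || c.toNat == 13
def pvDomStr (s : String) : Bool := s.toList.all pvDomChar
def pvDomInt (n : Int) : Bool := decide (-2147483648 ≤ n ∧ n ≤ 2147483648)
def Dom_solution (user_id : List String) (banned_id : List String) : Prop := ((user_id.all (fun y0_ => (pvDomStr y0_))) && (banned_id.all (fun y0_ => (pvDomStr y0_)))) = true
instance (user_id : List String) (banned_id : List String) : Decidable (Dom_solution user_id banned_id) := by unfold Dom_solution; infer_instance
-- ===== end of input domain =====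

-- B replaces A's DFS backtracking by flat cartesian-product enumeration + distinctness filter + set dedup (alternative structure, same results).

-- ===== PORT A =====
-- A's inner 'for j in range(len(ban)) … continue/break … else: temp.append(user)' loop,
-- walking both strings position by position and breaking on the first mismatch
def pvBanOkA : List Char → List Char → Bool
  | _, [] => true
  | [], _ :: _ => false
  | u :: us, b :: bs => if u == b || b == '*' then pvBanOkA us bs else false

-- dfs ported with explicit fuel (call depth is at most banned_id.length + 1); state (i, select, cases)
def pvDfsA (allL : List (List String)) (n : Nat) : Nat → Nat → List String → List (List String) → List (List String)
  | 0, _, _, cases => cases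
  | fuel + 1, i, select, cases =>
    if select.length == n then
      (if PySem.List.sorted select (fun x => x) false ∈ cases then cases
       else cases ++ [PySem.List.sorted select (fun x => x) false])
    else
      (allL.getD i []).foldl
        (fun cs a => if a ∈ select then cs else pvDfsA allL n fuel (i + 1) (select ++ [a]) cs)
        cases

def solution (user_id : List String) (banned_id : List String) : Int :=
  Int.ofNat
    (pvDfsA
      (banned_id.foldl
        (fun acc ban =>
          acc ++ [user_id.foldl
            (fun temp user =>
              if PySem.Str.len user == PySem.Str.len ban then
                (if pvBanOkA user.toList ban.toList then temp ++ [user] else temp)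
              else temp)
            []])
        [])
      banned_id.length (banned_id.length + 1) 0 [] []).length

-- ===== PORT B =====
def pvMatchesB (user ban : String) : Bool :=
  PySem.Str.len user == PySem.Str.len ban
    && (user.toList.zip ban.toList).all (fun p => p.2 == '*' || p.1 == p.2)

def solution_alt (user_id : List String) (banned_id : List String) : Int :=
  Int.ofNat
    (List.foldl
      (fun (r : PySem.Set (List String)) combo =>
        if (PySem.Set.ofList combo).length == combo.length then
          -- frozenset(combo) modelled by its canonical representative: the sorted list of its distinct elements
          PySem.Set.add r (PySem.List.sorted (PySem.Set.ofList combo) (fun x => x) false)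
        else r)
      PySem.Set.empty
      -- combos: iterative cartesian product of the candidate lists, tuples as lists extended on the right;
      -- list(dict.fromkeys(…)) is PySem.List.dedup
      ((banned_id.map (fun ban => PySem.List.dedup (user_id.filter (fun u => pvMatchesB u ban)))).foldl
        (fun cbs cand => cbs.flatMap (fun c => cand.map (fun u => c ++ [u]))) [[]])).length

-- ===== PRECONDITION & SPEC =====
def Spec_solution (user_id : List String) (banned_id : List String) (out : Int) : Prop := out = solution_alt user_id banned_id
instance (user_id : List String) (banned_id : List String) (out : Int) : Decidable (Spec_solution user_id banned_id out) := by unfold Spec_solution; infer_instance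

-- ===== CLAIM (what is proved, stated in full; the proofs are below) =====
def Claim_equal_solution : Prop := ∀ (user_id : List String) (banned_id : List String), Dom_solution user_id banned_id → Spec_solution user_id banned_id (solution user_id banned_id)

-- ===== LEMMAS AND PROOFS =====

-- recursive cartesian product, first factor varying slowest
def pvProdL : List (List String) → List (List String)
  | [] => [[]]
  | c :: rest => c.flatMap (fun a => (pvProdL rest).map (a :: ·))

theorem pv_foldl_flatMap {α β γ : Type} (g : α → List β) (f : γ → β → γ) :
    ∀ (l : List α) (init : γ),
      (l.flatMap g).foldl f init = l.foldl (fun acc x => (g x).foldl f acc) init := by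
  intro l
  induction l with
  | nil => intro init; rfl
  | cons x xs ih =>
    intro init
    simp [List.flatMap_cons, List.foldl_append, ih]

-- B's iterative product build equals the recursive product
theorem pv_combos_eq (cands : List (List String)) :
    ∀ (P : List (List String)),
      cands.foldl (fun cbs cand => cbs.flatMap (fun c => cand.map (fun u => c ++ [u]))) P
        = P.flatMap (fun p => (pvProdL cands).map (fun t => p ++ t)) := by
  induction cands with
  | nil =>
    intro P; simp [pvProdL]
  | cons c rest ih =>
    intro P
    simp only [List.foldl_cons, ih, pvProdL]
    rw [List.flatMap_assoc]
    congr 1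
    funext p
    rw [List.flatMap_map, List.map_flatMap]
    congr 1
    funext a
    rw [List.map_map]
    congr 1
    funext t
    simp

-- PySem.Set.ofList keeps a sublist (the first occurrences)
theorem pv_ofList_sublist (t : List String) : (PySem.Set.ofList t).Sublist t := by
  induction t using List.reverseRecOn with
  | nil => simp [PySem.Set.ofList_nil]
  | append_singleton xs x ih =>
    rw [PySem.Set.ofList_append_singleton, PySem.Set.add_eq_ite]
    split
    · exact ih.trans (List.sublist_append_left xs [x])
    · exact List.Sublist.append ih (List.Sublist.refl [x])

-- the len(set(combo)) == len(combo) test is exactly the no-duplicates test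
theorem pv_ofList_len_iff (t : List String) :
    ((PySem.Set.ofList t).length == t.length) = true ↔ t.Nodup := by
  rw [beq_iff_eq]
  constructor
  · intro h
    have h' := (pv_ofList_sublist t).eq_of_length h
    have hnd := PySem.Set.nodup_ofList (α := String) t
    rwa [h'] at hnd
  · intro h
    rw [PySem.Set.ofList_eq_self_of_nodup t h]

-- the dfs equals a fold over the product of the remaining candidate lists
theorem pv_dfs_eq (allL : List (List String)) (n : Nat) :
    ∀ (rest : List (List String)) (fuel i : Nat) (select : List String)
      (cases : List (List String)),
      allL.drop i = rest → select.length + rest.length = n → rest.length + 1 ≤ fuel →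
      select.Nodup →
      pvDfsA allL n fuel i select cases =
        (pvProdL rest).foldl
          (fun cs t =>
            if (select ++ t).Nodup then
              (if PySem.List.sorted (select ++ t) (fun x => x) false ∈ cs then cs
               else cs ++ [PySem.List.sorted (select ++ t) (fun x => x) false])
            else cs)
          cases := by
  intro rest
  induction rest with
  | nil =>
    intro fuel i select cases hdrop hlen hfuel hnd
    obtain ⟨f, rfl⟩ : ∃ f, fuel = f + 1 := ⟨fuel - 1, by omega⟩
    have hsel : select.length = n := by simpa using hlen
    simp [pvDfsA, pvProdL, hsel, hnd]
  | cons c rest' ih =>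
    intro fuel i select cases hdrop hlen hfuel hnd
    obtain ⟨f, rfl⟩ : ∃ f, fuel = f + 1 := ⟨fuel - 1, by omega⟩
    have hne : (select.length == n) = false := by
      simp only [List.length_cons] at hlen
      simp only [beq_eq_false_iff_ne, ne_eq]
      omega
    have hget : allL.getD i [] = c := by
      have h0 : (allL.drop i)[0]? = some c := by rw [hdrop]; rfl
      rw [List.getElem?_drop] at h0
      have h0' : allL[i]? = some c := by simpa using h0
      simp [List.getD, h0']
    rw [pvDfsA, hne]
    simp only [Bool.false_eq_true, if_false, hget]
    rw [pvProdL, pv_foldl_flatMap]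
    apply PySem.List.foldl_congr_mem
    intro cs a _
    rw [List.foldl_map]
    by_cases hmem : a ∈ select
    · rw [if_pos hmem]
      have hno : ∀ t : List String, ¬ (select ++ a :: t).Nodup := by
        intro t hcon
        rw [List.nodup_append] at hcon
        exact hcon.2.2 a hmem a (by simp) rfl
      rw [PySem.List.foldl_congr_mem _ _ (fun cs' _ => cs') cs
        (by intro acc t _; rw [if_neg (hno t)]), PySem.List.foldl_ignore]
    · rw [if_neg hmem]
      have hdrop' : allL.drop (i + 1) = rest' := by
        rw [← List.tail_drop, hdrop]; rfl
      have hnd' : (select ++ [a]).Nodup :=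
        List.Nodup.append hnd (List.nodup_singleton a)
          (by intro x hx hxa
              obtain rfl := List.mem_singleton.mp hxa
              exact hmem hx)
      rw [ih f (i + 1) (select ++ [a]) cs hdrop'
        (by simp only [List.length_append, List.length_cons, List.length_nil] at hlen ⊢; omega)
        (by simp only [List.length_cons] at hfuel; omega) hnd']
      apply PySem.List.foldl_congr_mem
      intro cs' t _
      simp [List.append_assoc]

-- A's wildcard loop equals B's zip+all test, on equal-length strings
theorem pv_banOk_eq : ∀ (bs us : List Char), us.length = bs.length →
    pvBanOkA us bs = (us.zip bs).all (fun p => p.2 == '*' || p.1 == p.2) := by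
  intro bs
  induction bs with
  | nil =>
    intro us hlen
    have : us = [] := List.length_eq_zero_iff.mp hlen
    subst this; rfl
  | cons b bs' ih =>
    intro us hlen
    cases us with
    | nil => simp at hlen
    | cons u us' =>
      simp only [List.length_cons] at hlen
      simp only [pvBanOkA, List.zip_cons_cons, List.all_cons]
      rw [Bool.or_comm]
      cases h : (b == '*' || u == b) with
      | false => rfl
      | true => rw [if_pos rfl, Bool.true_and, ih us' (by omega)]

-- A's candidate list for one pattern equals B's filter
theorem pv_cand_eq (user_id : List String) (ban : String) :
    user_id.foldl
      (fun temp user =>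
        if PySem.Str.len user == PySem.Str.len ban then
          (if pvBanOkA user.toList ban.toList then temp ++ [user] else temp)
        else temp)
      []
    = user_id.filter (fun u => pvMatchesB u ban) := by
  rw [PySem.List.foldl_congr_mem _ _
      (fun temp user => if pvMatchesB user ban then temp ++ [user] else temp) []
      ?_]
  · rw [PySem.List.foldl_append_if_eq_filter, List.nil_append]
  · intro temp u _
    by_cases hc1 : (PySem.Str.len u == PySem.Str.len ban) = true
    · have hlen : u.toList.length = ban.toList.length := by
        rw [beq_iff_eq, PySem.Str.len_eq, PySem.Str.len_eq] at hc1
        exact_mod_cast hc1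
      rw [if_pos hc1]
      simp only [pvMatchesB, hc1, Bool.true_and, pv_banOk_eq ban.toList u.toList hlen]
    · rw [if_neg hc1]
      have hb : pvMatchesB u ban = false := by
        simp only [pvMatchesB, Bool.and_eq_false_iff]
        left; simpa using hc1
      simp only [hb, Bool.false_eq_true, if_false]


-- the per-combo step both ports reduce to: keep combos without duplicates, dedup by sorted key
def pvStepA (cs : List (List String)) (t : List String) : List (List String) :=
  if t.Nodup then
    (if PySem.List.sorted t (fun x => x) false ∈ cs then cs
     else cs ++ [PySem.List.sorted t (fun x => x) false])
  else cs

theorem pv_mem_stepA (init : List (List String)) (c : List String) (k : List String) :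
    k ∈ pvStepA init c ↔ k ∈ init ∨ (c.Nodup ∧ k = PySem.List.sorted c (fun x => x) false) := by
  unfold pvStepA
  split_ifs with h1 h2
  · constructor
    · exact fun h => Or.inl h
    · rintro (h | ⟨-, rfl⟩)
      · exact h
      · exact h2
  · rw [List.mem_append, List.mem_singleton]
    constructor
    · rintro (h | h)
      · exact Or.inl h
      · exact Or.inr ⟨h1, h⟩
    · rintro (h | ⟨-, h⟩)
      · exact Or.inl h
      · exact Or.inr h
  · constructor
    · exact fun h => Or.inl h
    · rintro (h | ⟨hc, -⟩)
      · exact h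
      · exact absurd hc h1

theorem pv_mem_foldStep :
    ∀ (l : List (List String)) (init : List (List String)) (k : List String),
      k ∈ l.foldl pvStepA init ↔
        k ∈ init ∨ ∃ t ∈ l, t.Nodup ∧ k = PySem.List.sorted t (fun x => x) false := by
  intro l
  induction l with
  | nil => intro init k; simp
  | cons c l ih =>
    intro init k
    rw [List.foldl_cons, ih, pv_mem_stepA, List.exists_mem_cons_iff]
    tauto

theorem pv_nodup_foldStep :
    ∀ (l : List (List String)) (init : List (List String)), init.Nodup →
      (l.foldl pvStepA init).Nodup := by
  intro l
  induction l with
  | nil => intro init h; exact h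
  | cons c l ih =>
    intro init h
    rw [List.foldl_cons]
    apply ih
    unfold pvStepA
    split_ifs with h1 h2
    · exact h
    · refine List.Nodup.append h (List.nodup_singleton _) ?_
      intro x hx hxs
      obtain rfl := List.mem_singleton.mp hxs
      exact h2 hx
    · exact h

-- deduplicating each candidate list does not change which combos (as elements) the product contains
theorem pv_mem_prod_dedup :
    ∀ (cs : List (List String)) (t : List String),
      t ∈ pvProdL (cs.map PySem.List.dedup) ↔ t ∈ pvProdL cs := by
  intro cs
  induction cs with
  | nil => intro t; simp [pvProdL]
  | cons c cs ih =>
    intro t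
    simp [pvProdL, List.mem_flatMap, List.mem_map, ih]

theorem pv_fold_len_dedup (C : List (List String)) :
    (List.foldl pvStepA [] (pvProdL C)).length
      = (List.foldl pvStepA [] (pvProdL (C.map PySem.List.dedup))).length := by
  refine List.Perm.length_eq ?_
  refine (List.perm_ext_iff_of_nodup (pv_nodup_foldStep _ _ List.nodup_nil)
    (pv_nodup_foldStep _ _ List.nodup_nil)).mpr ?_
  intro k
  rw [pv_mem_foldStep, pv_mem_foldStep]
  constructor
  · rintro (h | ⟨t, ht, hq⟩)
    · exact Or.inl h
    · exact Or.inr ⟨t, (pv_mem_prod_dedup C t).mpr ht, hq⟩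
  · rintro (h | ⟨t, ht, hq⟩)
    · exact Or.inl h
    · exact Or.inr ⟨t, (pv_mem_prod_dedup C t).mp ht, hq⟩

-- ===== VERDICT (by name: the statement is the Claim_ definition above) =====
theorem solution_spec : Claim_equal_solution := by
  unfold Claim_equal_solution
  intro user_id banned_id _
  unfold Spec_solution solution solution_alt
  rw [PySem.List.foldl_append_singleton_eq_map, List.nil_append]
  have hcand : (fun ban => user_id.foldl
      (fun temp user =>
        if PySem.Str.len user == PySem.Str.len ban then
          (if pvBanOkA user.toList ban.toList then temp ++ [user] else temp)
        else temp) [])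
      = (fun ban => user_id.filter (fun u => pvMatchesB u ban)) :=
    funext (pv_cand_eq user_id)
  rw [hcand]
  rw [pv_dfs_eq (banned_id.map (fun ban => user_id.filter (fun u => pvMatchesB u ban)))
      banned_id.length
      (banned_id.map (fun ban => user_id.filter (fun u => pvMatchesB u ban)))
      (banned_id.length + 1) 0 [] [] rfl (by simp) (by simp) List.nodup_nil]
  rw [pv_combos_eq]
  simp only [List.flatMap_cons, List.flatMap_nil, List.nil_append, List.append_nil,
    List.map_id']
  have hstep : ∀ (cs : PySem.Set (List String)) (t : List String),
      (if (PySem.Set.ofList t).length == t.length then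
        PySem.Set.add cs (PySem.List.sorted (PySem.Set.ofList t) (fun x => x) false)
      else cs) = pvStepA cs t := by
    intro cs t
    unfold pvStepA
    by_cases hnd : t.Nodup
    · have hb := (pv_ofList_len_iff t).mpr hnd
      rw [if_pos hb, PySem.Set.ofList_eq_self_of_nodup t hnd, PySem.Set.add_eq_ite, if_pos hnd]
    · have hb : ¬ ((PySem.Set.ofList t).length == t.length) = true :=
        fun hcon => hnd ((pv_ofList_len_iff t).mp hcon)
      rw [if_neg hb, if_neg hnd]
  have hmm : banned_id.map (fun ban => PySem.List.dedup (List.filter (fun u => pvMatchesB u ban) user_id))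
      = (banned_id.map (fun ban => List.filter (fun u => pvMatchesB u ban) user_id)).map PySem.List.dedup := by
    rw [List.map_map]; rfl
  rw [hmm]
  refine congrArg Int.ofNat ?_
  rw [PySem.List.foldl_congr_mem _ _ pvStepA PySem.Set.empty (fun cs t _ => hstep cs t)]
  exact pv_fold_len_dedup _
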